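-- pv_equiv track=rewrite | github.com/armishra111/Loop-TNR | loss_function.py | get_allowed_nonuples
-- ===== SOURCE A (Python) =====
-- from itertools import product
--
-- def get_allowed_nonuples(allowed_pairs, vertical_allowed_pairs, modules):
--
--     allowed_nonuple = set()
--     allowed_set = set(allowed_pairs)
--     vertical_set = set(vertical_allowed_pairs)
--
--     for (A, B), (D, E), (G, H) in product(allowed_set, repeat = 3):
--         for (C, F, I) in product(modules, repeat = 3):
--
--             horizontal_pairs = [(A, B), (B, C), (D, E), (E, F), (G, H), (H, I)]
--             if any(pair not in allowed_set for pair in horizontal_pairs):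
--                 continue
--
--             verticle_pairs = [(A, D), (D, G), (B, E), (E, H), (C, F), (F, I)]
--             if any(pair not in vertical_set for pair in verticle_pairs):
--                 continue
--
--             allowed_nonuple.add((A, B, C, D, E, F, G, H, I))
--
--     return allowed_nonuple
-- ===== SOURCE B (Python) =====
-- def get_allowed_nonuples(allowed_pairs, vertical_allowed_pairs, modules):
--     allowed_set = set(allowed_pairs)
--     vertical_set = set(vertical_allowed_pairs)
--     # one-time precomputation: each allowed pair together with the modules
--     # that may legally follow it horizontally
--     rows = [((x, y), [m for m in modules if (y, m) in allowed_set])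
--             for (x, y) in allowed_set]
--     result = set()
--     for (A, B), succB in rows:
--         for (D, E), succE in rows:
--             if (A, D) not in vertical_set or (B, E) not in vertical_set:
--                 continue
--             for (G, H), succH in rows:
--                 if (D, G) not in vertical_set or (E, H) not in vertical_set:
--                     continue
--                 for C in succB:
--                     for F in succE:
--                         if (C, F) not in vertical_set:
--                             continue
--                         for I in succH:
--                             if (F, I) in vertical_set:
--                                 result.add((A, B, C, D, E, F, G, H, I))
--     return result
-- ===== Notes on version B (the rewrite author's own statement) =====
-- stated objective: faster
-- what changed: B precomputes for each allowed pair the list of modules that may follow it horizontally and prunes row combinations by the vertical constraints before entering the inner loops, instead of A's brute-force scan of all |pairs|^3 * |modules|^3 candidate grids.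
import Mathlib
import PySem

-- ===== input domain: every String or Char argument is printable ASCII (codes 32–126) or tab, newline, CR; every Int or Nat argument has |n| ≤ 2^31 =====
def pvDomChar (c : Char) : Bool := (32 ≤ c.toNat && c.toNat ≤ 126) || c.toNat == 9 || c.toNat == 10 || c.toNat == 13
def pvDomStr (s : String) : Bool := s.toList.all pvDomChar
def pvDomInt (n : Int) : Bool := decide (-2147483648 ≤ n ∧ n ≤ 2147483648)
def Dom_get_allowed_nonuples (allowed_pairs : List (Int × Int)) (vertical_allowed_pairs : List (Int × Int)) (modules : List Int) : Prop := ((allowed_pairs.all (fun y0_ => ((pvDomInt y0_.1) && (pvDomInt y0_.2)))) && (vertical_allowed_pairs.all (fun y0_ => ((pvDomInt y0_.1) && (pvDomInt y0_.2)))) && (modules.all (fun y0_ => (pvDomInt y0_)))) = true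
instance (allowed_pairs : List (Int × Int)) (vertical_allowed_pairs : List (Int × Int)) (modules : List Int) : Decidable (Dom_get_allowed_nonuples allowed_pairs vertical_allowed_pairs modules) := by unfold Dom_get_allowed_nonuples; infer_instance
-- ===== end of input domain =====

-- B precomputes, once per allowed pair, the modules that may follow it horizontally, and prunes
-- vertical mismatches between rows early, instead of A's brute-force scan of all |pairs|^3 * |modules|^3
-- combinations; both return a set, so the insertion order modelled here is the ports' shared order.

-- ===== PORT A =====
def get_allowed_nonuples (allowed_pairs : List (Int × Int)) (vertical_allowed_pairs : List (Int × Int)) (modules : List Int) : List (List Int) :=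
  let allowed_set : PySem.Set (Int × Int) := PySem.Set.ofList allowed_pairs
  let vertical_set : PySem.Set (Int × Int) := PySem.Set.ofList vertical_allowed_pairs
  -- for (A,B),(D,E),(G,H) in product(allowed_set, repeat=3): for (C,F,I) in product(modules, repeat=3)
  List.foldl (fun acc r1 =>
    List.foldl (fun acc r2 =>
      List.foldl (fun acc r3 =>
        List.foldl (fun acc C =>
          List.foldl (fun acc F =>
            List.foldl (fun acc I =>
              if ([(r1.1, r1.2), (r1.2, C), (r2.1, r2.2), (r2.2, F), (r3.1, r3.2), (r3.2, I)].any
                    (fun p => !(PySem.Set.contains allowed_set p))) then acc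
              else if ([(r1.1, r2.1), (r2.1, r3.1), (r1.2, r2.2), (r2.2, r3.2), (C, F), (F, I)].any
                    (fun p => !(PySem.Set.contains vertical_set p))) then acc
              else PySem.Set.add acc [r1.1, r1.2, C, r2.1, r2.2, F, r3.1, r3.2, I])
              acc modules) acc modules) acc modules) acc allowed_set) acc allowed_set)
    PySem.Set.empty allowed_set

-- ===== PORT B =====
def get_allowed_nonuples_alt (allowed_pairs : List (Int × Int)) (vertical_allowed_pairs : List (Int × Int)) (modules : List Int) : List (List Int) :=
  let allowed_set : PySem.Set (Int × Int) := PySem.Set.ofList allowed_pairs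
  let vertical_set : PySem.Set (Int × Int) := PySem.Set.ofList vertical_allowed_pairs
  -- rows = [((x,y), [m for m in modules if (y,m) in allowed_set]) for (x,y) in allowed_set]
  let rows : List ((Int × Int) × List Int) :=
    allowed_set.map (fun r => (r, modules.filter (fun m => PySem.Set.contains allowed_set (r.2, m))))
  List.foldl (fun acc x =>
    List.foldl (fun acc y =>
      if !(PySem.Set.contains vertical_set (x.1.1, y.1.1)) || !(PySem.Set.contains vertical_set (x.1.2, y.1.2)) then acc
      else List.foldl (fun acc z =>
        if !(PySem.Set.contains vertical_set (y.1.1, z.1.1)) || !(PySem.Set.contains vertical_set (y.1.2, z.1.2)) then acc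
        else List.foldl (fun acc C =>
          List.foldl (fun acc F =>
            if !(PySem.Set.contains vertical_set (C, F)) then acc
            else List.foldl (fun acc I =>
              if PySem.Set.contains vertical_set (F, I) then
                PySem.Set.add acc [x.1.1, x.1.2, C, y.1.1, y.1.2, F, z.1.1, z.1.2, I]
              else acc) acc z.2) acc y.2) acc x.2) acc rows) acc rows)
    PySem.Set.empty rows

-- ===== PRECONDITION & SPEC =====
def Spec_get_allowed_nonuples (allowed_pairs : List (Int × Int)) (vertical_allowed_pairs : List (Int × Int)) (modules : List Int) (out : List (List Int)) : Prop := out = get_allowed_nonuples_alt allowed_pairs vertical_allowed_pairs modules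
instance (allowed_pairs : List (Int × Int)) (vertical_allowed_pairs : List (Int × Int)) (modules : List Int) (out : List (List Int)) : Decidable (Spec_get_allowed_nonuples allowed_pairs vertical_allowed_pairs modules out) := by unfold Spec_get_allowed_nonuples; infer_instance

-- ===== CLAIM (what is proved, stated in full; the proofs are below) =====
def Claim_equal_get_allowed_nonuples : Prop := ∀ (allowed_pairs : List (Int × Int)) (vertical_allowed_pairs : List (Int × Int)) (modules : List Int), Dom_get_allowed_nonuples allowed_pairs vertical_allowed_pairs modules → Spec_get_allowed_nonuples allowed_pairs vertical_allowed_pairs modules (get_allowed_nonuples allowed_pairs vertical_allowed_pairs modules)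

-- ===== LEMMAS AND PROOFS =====

-- A's inner triple loop over (C, F, I), for a fixed choice of the three row pairs.
def pvInnerA (aset vset : List (Int × Int)) (modules : List Int) (A B D E G H : Int) (acc : List (List Int)) : List (List Int) :=
  List.foldl (fun acc C =>
    List.foldl (fun acc F =>
      List.foldl (fun acc I =>
        if ([(A, B), (B, C), (D, E), (E, F), (G, H), (H, I)].any
              (fun p => !(PySem.Set.contains aset p))) then acc
        else if ([(A, D), (D, G), (B, E), (E, H), (C, F), (F, I)].any
              (fun p => !(PySem.Set.contains vset p))) then acc
        else PySem.Set.add acc [A, B, C, D, E, F, G, H, I])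
        acc modules) acc modules) acc modules

-- B's inner triple loop over (C, F, I), for the same fixed rows.
def pvInnerB (aset vset : List (Int × Int)) (modules : List Int) (A B D E G H : Int) (acc : List (List Int)) : List (List Int) :=
  List.foldl (fun acc C =>
    List.foldl (fun acc F =>
      if !(PySem.Set.contains vset (C, F)) then acc
      else List.foldl (fun acc I =>
        if PySem.Set.contains vset (F, I) then PySem.Set.add acc [A, B, C, D, E, F, G, H, I]
        else acc) acc (modules.filter (fun m => PySem.Set.contains aset (H, m))))
      acc (modules.filter (fun m => PySem.Set.contains aset (E, m))))
    acc (modules.filter (fun m => PySem.Set.contains aset (B, m)))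

theorem pvInnerA_const (aset vset : List (Int × Int)) (modules : List Int) (A B D E G H : Int)
    (acc : List (List Int))
    (h : (A, B) ∉ aset ∨ (D, E) ∉ aset ∨ (G, H) ∉ aset ∨
         (A, D) ∉ vset ∨ (D, G) ∉ vset ∨ (B, E) ∉ vset ∨ (E, H) ∉ vset) :
    pvInnerA aset vset modules A B D E G H acc = acc := by
  unfold pvInnerA
  apply List.foldl_fixed'; intro C
  apply List.foldl_fixed'; intro F
  apply List.foldl_fixed'; intro I
  rcases h with h | h | h | h | h | h | h <;> simp [PySem.Set.contains, h]

-- With the fixed checks all true, A's inner triple loop equals B's.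
theorem pvInner_eq (aset vset : List (Int × Int)) (modules : List Int) (A B D E G H : Int)
    (hAB : (A, B) ∈ aset) (hDE : (D, E) ∈ aset) (hGH : (G, H) ∈ aset)
    (hAD : (A, D) ∈ vset) (hDG : (D, G) ∈ vset) (hBE : (B, E) ∈ vset) (hEH : (E, H) ∈ vset)
    (acc : List (List Int)) :
    pvInnerA aset vset modules A B D E G H acc = pvInnerB aset vset modules A B D E G H acc := by
  unfold pvInnerA pvInnerB
  rw [List.foldl_filter]
  apply List.foldl_ext; intro a C _
  by_cases hBC : (B, C) ∈ aset
  case neg =>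
    rw [if_neg (by simp [PySem.Set.contains, hBC])]
    apply List.foldl_fixed'; intro F
    apply List.foldl_fixed'; intro I
    simp [PySem.Set.contains, hBC]
  case pos =>
  rw [if_pos (by simp [PySem.Set.contains, hBC])]
  rw [List.foldl_filter]
  apply List.foldl_ext; intro a F _
  by_cases hEF : (E, F) ∈ aset
  case neg =>
    rw [if_neg (by simp [PySem.Set.contains, hEF])]
    apply List.foldl_fixed'; intro I
    simp [PySem.Set.contains, hEF]
  case pos =>
  rw [if_pos (by simp [PySem.Set.contains, hEF])]
  by_cases hCF : (C, F) ∈ vset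
  case neg =>
    rw [if_pos (by simp [PySem.Set.contains, hCF])]
    apply List.foldl_fixed'; intro I
    simp [PySem.Set.contains, hCF]
  case pos =>
  rw [if_neg (by simp [PySem.Set.contains, hCF])]
  rw [List.foldl_filter]
  apply List.foldl_ext; intro a I _
  by_cases hHI : (H, I) ∈ aset
  case neg => simp [PySem.Set.contains, hHI]
  case pos =>
  by_cases hFI : (F, I) ∈ vset
  case neg => simp [PySem.Set.contains, hHI, hFI]
  case pos => simp [PySem.Set.contains, hAB, hBC, hDE, hEF, hGH, hHI, hAD, hDG, hBE, hEH, hCF, hFI]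

theorem pv_main (aset vset : List (Int × Int)) (modules : List Int) :
    List.foldl (fun acc r1 =>
      List.foldl (fun acc r2 =>
        List.foldl (fun acc r3 =>
          pvInnerA aset vset modules r1.1 r1.2 r2.1 r2.2 r3.1 r3.2 acc) acc aset) acc aset)
      PySem.Set.empty aset
    = List.foldl (fun acc r1 =>
        List.foldl (fun acc r2 =>
          if !(PySem.Set.contains vset (r1.1, r2.1)) || !(PySem.Set.contains vset (r1.2, r2.2)) then acc
          else List.foldl (fun acc r3 =>
            if !(PySem.Set.contains vset (r2.1, r3.1)) || !(PySem.Set.contains vset (r2.2, r3.2)) then acc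
            else pvInnerB aset vset modules r1.1 r1.2 r2.1 r2.2 r3.1 r3.2 acc) acc aset) acc aset)
        PySem.Set.empty aset := by
  apply List.foldl_ext; intro a r1 h1
  apply List.foldl_ext; intro a r2 h2
  by_cases hAD : (r1.1, r2.1) ∈ vset
  case neg =>
    rw [if_pos (by simp [PySem.Set.contains, hAD])]
    apply List.foldl_fixed'; intro r3
    exact pvInnerA_const _ _ _ _ _ _ _ _ _ _ (by tauto)
  case pos =>
  by_cases hBE : (r1.2, r2.2) ∈ vset
  case neg =>
    rw [if_pos (by simp [PySem.Set.contains, hBE])]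
    apply List.foldl_fixed'; intro r3
    exact pvInnerA_const _ _ _ _ _ _ _ _ _ _ (by tauto)
  case pos =>
  rw [if_neg (by simp [PySem.Set.contains, hAD, hBE])]
  apply List.foldl_ext; intro a r3 h3
  by_cases hDG : (r2.1, r3.1) ∈ vset
  case neg =>
    rw [if_pos (by simp [PySem.Set.contains, hDG]), pvInnerA_const _ _ _ _ _ _ _ _ _ _ (by tauto)]
  case pos =>
  by_cases hEH : (r2.2, r3.2) ∈ vset
  case neg =>
    rw [if_pos (by simp [PySem.Set.contains, hEH]), pvInnerA_const _ _ _ _ _ _ _ _ _ _ (by tauto)]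
  case pos =>
  rw [if_neg (by simp [PySem.Set.contains, hDG, hEH])]
  exact pvInner_eq aset vset modules r1.1 r1.2 r2.1 r2.2 r3.1 r3.2 h1 h2 h3 hAD hDG hBE hEH a

-- ===== VERDICT (by name: the statement is the Claim_ definition above) =====
theorem get_allowed_nonuples_spec : Claim_equal_get_allowed_nonuples := by
  intro allowed_pairs vertical_allowed_pairs modules _
  unfold Spec_get_allowed_nonuples get_allowed_nonuples get_allowed_nonuples_alt
  simp only [List.foldl_map]
  exact pv_main (PySem.Set.ofList allowed_pairs) (PySem.Set.ofList vertical_allowed_pairs) modules
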